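-- pv_equiv track=rewrite | github.com/opussf/ProgChallenges | number_persistance/persistance.py | per_recursive
-- ===== SOURCE A (Python) =====
-- def per_recursive( n, steps=0, nums=[] ):
-- 	if steps == 0:
-- 		nums = []
-- 	nums.append( n )
-- 	if len( str( n ) ) == 1:
-- 		return steps, nums
--
--
-- 	digits = [int(i) for i in str(n)]
--
-- 	result = 1
-- 	for j in digits:
-- 		result *= j
--
-- 	steps, nums = per_recursive( result, steps+1, nums )
-- 	return steps, nums
-- ===== SOURCE B (Python) =====
-- def per_recursive(n, steps=0, nums=[]):
--     # Iterative unrolling of the recursion; digits multiplied arithmetically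
--     # (divmod by 10) instead of via str(). Appends to `nums` in place like the
--     # original; the steps==0 reset is re-checked each iteration, matching the
--     # recursive calls of the original exactly.
--     while True:
--         if steps == 0:
--             nums = []
--         nums.append(n)
--         if n < 10:
--             return steps, nums
--         result = 1
--         m = n
--         while m > 0:
--             result *= m % 10
--             m //= 10
--         n = result
--         steps += 1
-- ===== Notes on version B (the rewrite author's own statement) =====
-- stated objective: alternative
-- what changed: Replaces the recursion with a while-loop over the same accumulator and extracts/multiplies digits arithmetically with % 10 and //= 10 instead of converting n to a string and parsing each character back with int().
import Mathlib
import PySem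

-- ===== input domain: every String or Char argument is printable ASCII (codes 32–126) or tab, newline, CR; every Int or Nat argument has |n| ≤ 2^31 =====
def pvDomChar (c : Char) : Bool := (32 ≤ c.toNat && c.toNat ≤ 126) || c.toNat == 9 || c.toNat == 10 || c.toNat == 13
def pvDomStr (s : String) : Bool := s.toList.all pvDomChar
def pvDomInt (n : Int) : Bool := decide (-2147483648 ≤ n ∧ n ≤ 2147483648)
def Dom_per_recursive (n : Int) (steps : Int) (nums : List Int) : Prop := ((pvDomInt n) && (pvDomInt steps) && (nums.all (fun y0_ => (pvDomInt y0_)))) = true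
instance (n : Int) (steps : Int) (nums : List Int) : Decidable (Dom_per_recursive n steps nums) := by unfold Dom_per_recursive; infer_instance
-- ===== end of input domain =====

-- B replaces A's recursion-with-string-digits by a while loop multiplying digits
-- arithmetically (divmod by 10); A mutates `nums` in place when steps ≠ 0 — the
-- equivalence proved here is about the RETURN value only.

-- ===== PORT A =====
-- int(i) for a one-character string i; Python raises on a non-digit char (only
-- reachable when n < 0, which Pre_ excludes) — there this total form returns 0
def pvCVal (c : Char) : Int := (PySem.Int.ofStr? (String.ofList [c])).getD 0

-- A's recursion, with a fuel guard for totality only: the digit product of an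
-- n ≥ 10 is smaller than n, so fuel n.toNat + 2 is never exhausted on 0 ≤ n
def pvRecA : Nat → Int → Int → List Int → Int × List Int
  | 0, _, steps, nums => (steps, nums)
  | fuel + 1, n, steps, nums =>
    let nums1 := if steps = 0 then ([] : List Int) else nums
    let nums2 := nums1 ++ [n]
    if PySem.Str.len (PySem.Int.toStr n) = 1 then (steps, nums2)
    else
      let digits := List.map pvCVal (PySem.Int.toStr n).toList
      let result := List.foldl (fun acc j => acc * j) 1 digits
      pvRecA fuel result (steps + 1) nums2

def per_recursive (n : Int) (steps : Int) (nums : List Int) : Int × List Int :=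
  pvRecA (n.toNat + 2) n steps nums

-- ===== PORT B =====
-- inner while loop: while m > 0: result *= m % 10; m //= 10
-- (fuel guard only: m // 10 < m for m > 0, so fuel m.toNat is never exhausted)
def pvDigitLoopF : Nat → Int → Int → Int
  | 0, _, result => result
  | fuel + 1, m, result =>
    if 0 < m then pvDigitLoopF fuel (PySem.Int.floordiv m 10) (result * PySem.Int.mod m 10)
    else result

def pvDigitLoop (m : Int) (result : Int) : Int := pvDigitLoopF m.toNat m result

def pvRecB : Nat → Int → Int → List Int → Int × List Int
  | 0, _, steps, nums => (steps, nums)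
  | fuel + 1, n, steps, nums =>
    let nums1 := if steps = 0 then ([] : List Int) else nums
    let nums2 := nums1 ++ [n]
    if n < 10 then (steps, nums2)
    else pvRecB fuel (pvDigitLoop n 1) (steps + 1) nums2

def per_recursive_alt (n : Int) (steps : Int) (nums : List Int) : Int × List Int :=
  pvRecB (n.toNat + 2) n steps nums

-- ===== PRECONDITION & SPEC =====
-- Pre_ excludes exactly the negative n, on which A raises ValueError (int('-')
-- on the sign character of str(n)); everywhere else A returns normally.
def Pre_per_recursive (n : Int) (steps : Int) (nums : List Int) : Prop := 0 ≤ n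
instance (n : Int) (steps : Int) (nums : List Int) : Decidable (Pre_per_recursive n steps nums) := by unfold Pre_per_recursive; infer_instance
def pvWitness_per_recursive : Int × Int × List Int := (27, 0, [])

def Spec_per_recursive (n : Int) (steps : Int) (nums : List Int) (out : Int × List Int) : Prop := out = per_recursive_alt n steps nums
instance (n : Int) (steps : Int) (nums : List Int) (out : Int × List Int) : Decidable (Spec_per_recursive n steps nums out) := by unfold Spec_per_recursive; infer_instance

-- ===== CLAIM (what is proved, stated in full; the proofs are below) =====
def Claim_equal_per_recursive : Prop := ∀ (n : Int) (steps : Int) (nums : List Int), Dom_per_recursive n steps nums → Pre_per_recursive n steps nums → Spec_per_recursive n steps nums (per_recursive n steps nums)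

-- ===== LEMMAS AND PROOFS =====

-- the decimal digit characters of m, most significant first (= Nat.toDigits 10 m)
def pvRep (m : Nat) : List Char :=
  if _h : m < 10 then [Nat.digitChar m]
  else pvRep (m / 10) ++ [Nat.digitChar (m % 10)]
termination_by m
decreasing_by exact Nat.div_lt_self (by omega) (by norm_num)

-- arithmetic product of the decimal digits of m
def pvProdD (m : Nat) : Nat :=
  if m < 10 then m else pvProdD (m / 10) * (m % 10)
termination_by m
decreasing_by exact Nat.div_lt_self (by omega) (by norm_num)

theorem pvToDigitsCore_eq (fuel : Nat) : ∀ (n : Nat) (ds : List Char), 0 < fuel →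
    n < 10 ^ fuel → Nat.toDigitsCore 10 fuel n ds = pvRep n ++ ds := by
  induction fuel with
  | zero => omega
  | succ f ih =>
    intro n ds _ hlt
    rw [Nat.toDigitsCore]
    by_cases h10 : n / 10 = 0
    · simp only [h10]
      rw [pvRep]
      have hn : n < 10 := by omega
      simp [hn, Nat.mod_eq_of_lt hn]
    · simp only [h10, if_neg h10]
      have hf : 0 < f := by
        rcases Nat.eq_zero_or_pos f with hf0 | hf0
        · subst hf0; simp at hlt; omega
        · exact hf0
      have hdiv : n / 10 < 10 ^ f := by
        have : n < 10 ^ f * 10 := by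
          calc n < 10 ^ (f + 1) := hlt
          _ = 10 ^ f * 10 := by ring
        omega
      rw [ih (n / 10) (Nat.digitChar (n % 10) :: ds) hf hdiv]
      conv_rhs => rw [pvRep]
      have hn : ¬ n < 10 := by omega
      simp [hn]

theorem pvToChars_nonneg (n : Int) (h : 0 ≤ n) :
    PySem.Int.toChars n = pvRep n.toNat := by
  have hneg : ¬ n < 0 := by omega
  rw [show PySem.Int.toChars n = Nat.toDigits 10 n.toNat from by simp [PySem.Int.toChars, hneg]]
  rw [Nat.toDigits]
  rw [pvToDigitsCore_eq (n.toNat + 1) n.toNat [] (by omega)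
    (lt_of_lt_of_le (Nat.lt_pow_self (by norm_num)) (Nat.pow_le_pow_right (by norm_num) (by omega)))]
  simp

theorem pvRep_ne_nil (m : Nat) : pvRep m ≠ [] := by
  rw [pvRep]
  split <;> simp

theorem pvRep_len_one (m : Nat) : (pvRep m).length = 1 ↔ m < 10 := by
  rw [pvRep]
  split
  · simp; omega
  · have := pvRep_ne_nil (m / 10)
    constructor
    · intro hlen
      exfalso
      rcases List.exists_cons_of_ne_nil this with ⟨a, l, he⟩
      simp [he] at hlen
    · omega

theorem pvCVal_digitChar (d : Nat) (h : d < 10) : pvCVal (Nat.digitChar d) = (d : Int) := by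
  interval_cases d <;> decide

theorem pvFoldMap (m : Nat) : ∀ (a : Int),
    List.foldl (fun acc j => acc * j) a (List.map pvCVal (pvRep m)) = a * (pvProdD m : Int) := by
  induction m using Nat.strong_induction_on with
  | h m ih =>
    intro a
    rw [pvRep, pvProdD]
    by_cases h : m < 10
    · simp [h, pvCVal_digitChar m h]
    · simp only [h, dite_false, if_false, List.map_append, List.foldl_append]
      rw [ih (m / 10) (Nat.div_lt_self (by omega) (by norm_num)) a]
      simp [pvCVal_digitChar (m % 10) (Nat.mod_lt _ (by norm_num))]
      push_cast
      ring

theorem pvProdD_le (m : Nat) : ∀ (_ : 1 ≤ m), pvProdD m ≤ m := by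
  induction m using Nat.strong_induction_on with
  | h m ih =>
    intro h1
    rw [pvProdD]
    by_cases h : m < 10
    · simp [h]
    · simp only [h]
      have hd : m / 10 < m := Nat.div_lt_self (by omega) (by norm_num)
      have h1' : 1 ≤ m / 10 := (Nat.one_le_div_iff (by norm_num)).mpr (by omega)
      have := ih (m / 10) hd h1'
      have hm : m % 10 ≤ 9 := by omega
      calc pvProdD (m / 10) * (m % 10) ≤ (m / 10) * 9 := Nat.mul_le_mul this hm
        _ ≤ m := by omega

theorem pvProdD_lt (m : Nat) (h : 10 ≤ m) : pvProdD m < m := by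
  rw [pvProdD]
  have hlt : ¬ m < 10 := by omega
  simp only [hlt]
  have h1' : 1 ≤ m / 10 := (Nat.one_le_div_iff (by norm_num)).mpr (by omega)
  have := pvProdD_le (m / 10) h1'
  have hm : m % 10 ≤ 9 := by omega
  calc pvProdD (m / 10) * (m % 10) ≤ (m / 10) * 9 := Nat.mul_le_mul this hm
    _ < m := by omega

-- A's digit product: pvProdD n.toNat, for 0 ≤ n
theorem pvResultA_nonneg (n : Int) (h : 0 ≤ n) :
    List.foldl (fun acc j => acc * j) 1 (List.map pvCVal (PySem.Int.toStr n).toList)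
      = (pvProdD n.toNat : Int) := by
  rw [PySem.Int.toList_toStr, pvToChars_nonneg n h, pvFoldMap n.toNat 1, one_mul]

-- condition bridge: len(str(n)) == 1 ↔ n < 10, for 0 ≤ n
theorem pvLenCond (n : Int) (h : 0 ≤ n) :
    (PySem.Str.len (PySem.Int.toStr n) = 1 ↔ n < 10) := by
  simp only [PySem.Str.len_eq, PySem.Int.toList_toStr, pvToChars_nonneg n h]
  have h1 := pvRep_len_one n.toNat
  omega

-- B's inner loop computes result * pvProdD, for any sufficient fuel
theorem pvDigitLoopF_zero (fuel : Nat) (p : Int) : pvDigitLoopF fuel 0 p = p := by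
  cases fuel <;> simp [pvDigitLoopF]

theorem pvDigitLoopF_eq (fuel : Nat) : ∀ (a : Nat) (p : Int), 0 < a → a ≤ fuel →
    pvDigitLoopF fuel (a : Int) p = p * (pvProdD a : Int) := by
  induction fuel with
  | zero => omega
  | succ f ih =>
    intro a p ha _
    rw [pvDigitLoopF]
    have hpos : (0:Int) < (a:Int) := by exact_mod_cast ha
    rw [if_pos hpos]
    have hfd : PySem.Int.floordiv (a:Int) 10 = ((a / 10 : Nat) : Int) := by
      rw [PySem.Int.floordiv, Int.fdiv_eq_ediv]; simp <;> omega
    have hmd : PySem.Int.mod (a:Int) 10 = ((a % 10 : Nat) : Int) := by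
      rw [PySem.Int.mod, Int.fmod_def, Int.fdiv_eq_ediv]; simp <;> omega
    rw [hfd, hmd]
    by_cases h10 : a < 10
    · have hz : a / 10 = 0 := by omega
      rw [hz]
      rw [show ((0:Nat):Int) = (0:Int) from rfl, pvDigitLoopF_zero]
      rw [pvProdD, if_pos h10, Nat.mod_eq_of_lt h10]
    · have hda : a / 10 < a := Nat.div_lt_self (by omega) (by norm_num)
      have h1 : 0 < a / 10 := (Nat.one_le_div_iff (by norm_num)).mpr (by omega)
      rw [ih (a / 10) (p * ((a % 10 : Nat) : Int)) h1 (by omega)]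
      conv_rhs => rw [pvProdD]
      simp only [h10, if_neg h10]
      push_cast
      ring

theorem pvDigitLoop_eq (a : Nat) (ha : 0 < a) (p : Int) :
    pvDigitLoop (a : Int) p = p * (pvProdD a : Int) := by
  rw [pvDigitLoop, Int.toNat_natCast]
  exact pvDigitLoopF_eq a a p ha le_rfl

theorem pvAgreeF (fuel : Nat) : ∀ (a : Nat) (steps : Int) (nums : List Int), a < fuel →
    pvRecA fuel (a : Int) steps nums = pvRecB fuel (a : Int) steps nums := by
  induction fuel with
  | zero => omega
  | succ f ih =>
    intro a steps nums hfu
    have hnn : (0:Int) ≤ (a:Int) := Int.natCast_nonneg a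
    rw [pvRecA, pvRecB]
    by_cases h10 : a < 10
    · have hc : PySem.Str.len (PySem.Int.toStr (a:Int)) = 1 :=
        (pvLenCond _ hnn).mpr (by exact_mod_cast h10)
      have hc2 : ((a:Int) < 10) := by exact_mod_cast h10
      simp only [hc, hc2, if_pos]
    · have hc : ¬ PySem.Str.len (PySem.Int.toStr (a:Int)) = 1 := fun hh =>
        h10 (by exact_mod_cast (pvLenCond _ hnn).mp hh)
      have hc2 : ¬ ((a:Int) < 10) := by omega
      simp only [hc, hc2, if_false]
      rw [pvResultA_nonneg (a:Int) hnn,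
        show pvDigitLoop (a:Int) 1 = ((pvProdD a : Nat) : Int) from by
          rw [pvDigitLoop_eq a (by omega) 1, one_mul]]
      have hlt := pvProdD_lt a (by omega)
      exact ih (pvProdD a) (steps + 1) _ (by omega)

-- ===== VERDICT (by name: the statement is the Claim_ definition above) =====
theorem per_recursive_spec : Claim_equal_per_recursive := by
  intro n steps nums _ hpre
  unfold Spec_per_recursive
  have h : n = ((n.toNat : Nat) : Int) := by
    have := Int.toNat_of_nonneg hpre; omega
  rw [per_recursive, per_recursive_alt, h, Int.toNat_natCast]
  exact pvAgreeF (n.toNat + 2) n.toNat steps nums (by omega)
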